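-- pv_equiv track=rewrite | github.com/juderozario08/PythonProjectsMAC | PythonProblems-main/labs109.py | colour_trio
-- ===== SOURCE A (Python) =====
-- def colour_trio(colours):
--     if len(colours) == 1:
--         return colours
--     result = ''
--     for i in range(len(colours)-1):
--         if colours[i] == 'r':
--             if colours[i+1] == 'b':
--                 result += 'y'
--             elif colours[i+1] == 'r':
--                 result += 'r'
--             else:
--                 result += 'b'
--         elif colours[i] == 'y':
--             if colours[i+1] == 'b':
--                 result += 'r'
--             elif colours[i+1] == 'r':
--                 result += 'b'
--             else:
--                 result += 'y'
--         elif colours[i] == 'b':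
--             if colours[i+1] == 'r':
--                 result += 'y'
--             elif colours[i+1] == 'y':
--                 result += 'r'
--             else:
--                 result += 'b'
--     return colour_trio(result)
-- ===== SOURCE B (Python) =====
-- # One mixing pass turns any input into a string of colour characters only; after that the whole remaining
-- # cascade collapses to the GF(3) closed form result = (-1)^(L-1) * sum_i C(L-1,i)*t_i mod 3
-- # (r=0, y=1, b=2), with each binomial coefficient mod 3 from Lucas' theorem.
--
-- _BINOM_SMALL = ((1, 0, 0), (1, 1, 0), (1, 2, 1))  # C(m, k) for 0 <= m, k <= 2
--
-- def _binom3(m, k):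
--     """C(m, k) mod 3 by Lucas' theorem."""
--     r = 1
--     while k:
--         r = r * _BINOM_SMALL[m % 3][k % 3] % 3
--         m //= 3
--         k //= 3
--     return r
--
-- def colour_trio(colours):
--     if len(colours) == 1:
--         return colours
--     first = []
--     for a, b in zip(colours, colours[1:]):
--         if a == 'r':
--             first.append('y' if b == 'b' else ('r' if b == 'r' else 'b'))
--         elif a == 'y':
--             first.append('r' if b == 'b' else ('b' if b == 'r' else 'y'))
--         elif a == 'b':
--             first.append('y' if b == 'r' else ('r' if b == 'y' else 'b'))
--     n = len(first)
--     val = {'r': 0, 'y': 1, 'b': 2}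
--     total = 0
--     for i, c in enumerate(first):
--         total += _binom3(n - 1, i) * val[c]
--     if (n - 1) % 2 == 1:
--         total = -total
--     return 'ryb'[total % 3]
-- ===== Notes on version B (the rewrite author's own statement) =====
-- stated objective: faster
-- what changed: Keeps one linear mixing pass (which already yields a string of colour characters only) and replaces the remaining quadratic chain of passes with the GF(3) closed form (-1)^(L-1) * sum_i C(L-1,i)*t_i mod 3 (r=0,y=1,b=2), each binomial coefficient mod 3 computed digit-by-digit via Lucas' theorem.
import Mathlib
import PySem

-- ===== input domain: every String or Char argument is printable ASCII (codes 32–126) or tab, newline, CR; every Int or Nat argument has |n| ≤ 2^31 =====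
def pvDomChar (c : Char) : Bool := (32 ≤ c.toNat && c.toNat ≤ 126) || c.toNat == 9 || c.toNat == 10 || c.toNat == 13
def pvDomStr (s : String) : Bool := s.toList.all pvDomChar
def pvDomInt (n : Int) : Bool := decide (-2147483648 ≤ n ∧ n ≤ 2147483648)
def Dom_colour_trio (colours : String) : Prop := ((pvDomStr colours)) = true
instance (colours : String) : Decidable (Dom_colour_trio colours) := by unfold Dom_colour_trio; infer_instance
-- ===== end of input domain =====

-- B replaces A's O(n^2) repeated pairwise-mixing passes by the O(n log n) GF(3) closed form
-- (-1)^(n-1) * sum C(n-1,i)*c_i mod 3 with binomials mod 3 from Lucas' theorem.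

-- ===== PORT A =====
-- one iteration step of A's inner loop: the branch cascade for the pair (colours[i], colours[i+1])
def mixA (a b : Char) : List Char :=
  if a = 'r' then
    (if b = 'b' then ['y'] else if b = 'r' then ['r'] else ['b'])
  else if a = 'y' then
    (if b = 'b' then ['r'] else if b = 'r' then ['b'] else ['y'])
  else if a = 'b' then
    (if b = 'r' then ['y'] else if b = 'y' then ['r'] else ['b'])
  else []

-- A's 'for i in range(len(colours)-1)' loop building result from adjacent pairs
def passA : List Char → List Char
  | a :: b :: rest => mixA a b ++ passA (b :: rest)
  | _ => []

-- A's tail recursion, with fuel (A diverges on inputs that reduce to the empty string;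
-- those are outside Pre_; inside Pre_ the length drops by 1 each round so fuel suffices)
def goA : Nat → List Char → List Char
  | 0, cs => cs
  | fuel + 1, cs => if cs.length = 1 then cs else goA fuel (passA cs)

def colour_trio (colours : String) : String :=
  String.ofList (goA (colours.toList.length + 1) colours.toList)

-- ===== PORT B =====
-- _BINOM_SMALL[m][k] for 0 <= m, k <= 2
def binomSmall (m k : Nat) : Nat :=
  match m, k with
  | 0, 0 => 1 | 1, 0 => 1 | 1, 1 => 1 | 2, 0 => 1 | 2, 1 => 2 | 2, 2 => 1 | _, _ => 0

-- the 'while k:' loop of _binom3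
def binom3go (m k r : Nat) : Nat :=
  if k = 0 then r else binom3go (m / 3) (k / 3) (r * binomSmall (m % 3) (k % 3) % 3)
  termination_by k
  decreasing_by exact Nat.div_lt_self (Nat.pos_of_ne_zero (by assumption)) (by omega)

def binom3 (m k : Nat) : Nat := binom3go m k 1

-- body of B's 'for a, b in zip(...)' loop: the char appended for the pair (a, b) ([] if none)
def mixB (a b : Char) : List Char :=
  if a = 'r' then [if b = 'b' then 'y' else if b = 'r' then 'r' else 'b']
  else if a = 'y' then [if b = 'b' then 'r' else if b = 'r' then 'b' else 'y']
  else if a = 'b' then [if b = 'r' then 'y' else if b = 'y' then 'r' else 'b']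
  else []

-- B's first pass: 'for a, b in zip(colours, colours[1:]): first.append(...)'
def passB (cs : List Char) : List Char :=
  (cs.zip cs.tail).foldl (fun acc p => acc ++ mixB p.1 p.2) []

-- the dict literal {'r':0,'y':1,'b':2}; after B's first pass only the three colour characters occur,
-- so the KeyError branch of val[c] is unreachable
def valC (c : Char) : Int := if c = 'r' then 0 else if c = 'y' then 1 else 2

def colour_trio_alt (colours : String) : String :=
  let cs := colours.toList
  if cs.length = 1 then colours else
  let first := passB cs
  let n := first.length
  let total : Int :=
    (PySem.List.enumerate first 0).foldl
      (fun t p => t + (binom3 (n - 1) p.1.toNat : Int) * valC p.2) 0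
  let total2 : Int := if PySem.Int.mod ((n : Int) - 1) 2 = 1 then -total else total
  match PySem.Str.pyGet? "ryb" (PySem.Int.mod total2 3) with
  | some c => String.ofList [c]
  | none => ""

-- ===== PRECONDITION & SPEC =====
-- Pre_ is exactly where A terminates: a single character, or length >= 2 with at least one
-- of the first len-1 characters equal to r, y or b (otherwise A's reduction reaches the empty string
-- and recurses forever, raising RecursionError).
def Pre_colour_trio (colours : String) : Prop :=
  colours.toList.length = 1 ∨
    (2 ≤ colours.toList.length ∧
      ((colours.toList.take (colours.toList.length - 1)).any
        (fun c => c == 'r' || c == 'y' || c == 'b')) = true)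
instance (colours : String) : Decidable (Pre_colour_trio colours) := by
  unfold Pre_colour_trio; infer_instance

def pvWitness_colour_trio : String := "rybby"

def Spec_colour_trio (colours : String) (out : String) : Prop := out = colour_trio_alt colours
instance (colours : String) (out : String) : Decidable (Spec_colour_trio colours out) := by
  unfold Spec_colour_trio; infer_instance

-- ===== CLAIM (what is proved, stated in full; the proofs are below) =====
def Claim_equal_colour_trio : Prop :=
  ∀ (colours : String), Dom_colour_trio colours → Pre_colour_trio colours →
    Spec_colour_trio colours (colour_trio colours)

-- ===== LEMMAS AND PROOFS =====

-- colour value in GF(3)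
def vz (c : Char) : ZMod 3 := if c = 'r' then 0 else if c = 'y' then 1 else 2
-- inverse of vz on {'r','y','b'}
def ichar (t : ZMod 3) : Char := if t = 0 then 'r' else if t = 1 then 'y' else 'b'
-- the weighted sum Σ_{i<|cs|} C(k,i) * v(cs[i])
def S (k : Nat) (cs : List Char) : ZMod 3 :=
  ∑ i ∈ Finset.range cs.length, (Nat.choose k i : ZMod 3) * vz (cs.getD i 'r')

abbrev Ryb (c : Char) : Prop := c = 'r' ∨ c = 'y' ∨ c = 'b'

lemma ichar_vz {c : Char} (h : Ryb c) : ichar (vz c) = c := by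
  rcases h with h | h | h <;> subst h <;> decide

lemma vz_ichar : ∀ t : ZMod 3, vz (ichar t) = t := by decide

lemma mixA_spec {a b : Char} (ha : Ryb a) (hb : Ryb b) :
    mixA a b = [ichar (-(vz a + vz b))] ∧ Ryb (ichar (-(vz a + vz b))) := by
  rcases ha with ha | ha | ha <;> rcases hb with hb | hb | hb <;> subst ha <;> subst hb <;>
    exact ⟨by decide, by decide⟩

lemma passA_cons_cons {a b : Char} {rest : List Char} (ha : Ryb a) (hb : Ryb b) :
    passA (a :: b :: rest) = ichar (-(vz a + vz b)) :: passA (b :: rest) := by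
  simp only [passA, (mixA_spec ha hb).1, List.singleton_append]

lemma passA_len {cs : List Char} (h : ∀ c ∈ cs, Ryb c) :
    (passA cs).length = cs.length - 1 := by
  induction cs with
  | nil => rfl
  | cons a rest ih =>
    cases rest with
    | nil => rfl
    | cons b rest' =>
      have ha : Ryb a := h a (by simp)
      have hb : Ryb b := h b (by simp)
      have ih' := ih (fun c hc => h c (by simp [hc]))
      rw [passA_cons_cons ha hb, List.length_cons, ih']
      simp

lemma mixA_all {a b : Char} : ∀ c ∈ mixA a b, Ryb c := by
  intro c hc
  unfold mixA at hc
  split_ifs at hc <;> simp only [List.mem_singleton, List.not_mem_nil] at hc <;>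
    first
      | exact absurd hc (by simp)
      | (subst hc; unfold Ryb; tauto)

lemma passA_all : ∀ {cs : List Char}, ∀ c ∈ passA cs, Ryb c := by
  intro cs
  induction cs with
  | nil => intro c hc; cases hc
  | cons a rest ih =>
    cases rest with
    | nil => intro c hc; cases hc
    | cons b rest' =>
      intro c hc
      rw [passA] at hc
      rcases List.mem_append.1 hc with hc | hc
      · exact mixA_all c hc
      · exact ih c hc

lemma mixA_ne {a b : Char} (ha : Ryb a) : mixA a b ≠ [] := by
  rcases ha with h | h | h <;> subst h <;> unfold mixA <;> split_ifs <;> simp_all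

lemma mixA_len_le {a b : Char} : (mixA a b).length ≤ 1 := by
  unfold mixA; split_ifs <;> simp

lemma passA_len_le : ∀ (cs : List Char), (passA cs).length ≤ cs.length - 1 := by
  intro cs
  induction cs with
  | nil => simp [passA]
  | cons a rest ih =>
    cases rest with
    | nil => simp [passA]
    | cons b rest' =>
      rw [passA, List.length_append]
      have := ih
      have h1 : (mixA a b).length ≤ 1 := mixA_len_le
      simp only [List.length_cons] at *
      omega

lemma passA_ne : ∀ (cs : List Char), 2 ≤ cs.length →
    ((cs.take (cs.length - 1)).any (fun c => c == 'r' || c == 'y' || c == 'b')) = true →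
    passA cs ≠ [] := by
  intro cs
  induction cs with
  | nil => intro h; simp at h
  | cons a rest ih =>
    cases rest with
    | nil => intro h; simp at h
    | cons b rest' =>
      intro _ hany
      have htake : (a :: b :: rest').take ((a :: b :: rest').length - 1)
          = a :: (b :: rest').take ((b :: rest').length - 1) := by
        simp [List.take_succ_cons]
      rw [htake, List.any_cons, Bool.or_eq_true] at hany
      rw [passA]
      rcases hany with hA | hany
      · have ha : Ryb a := by
          simp only [Bool.or_eq_true, beq_iff_eq] at hA
          unfold Ryb; tauto
        intro hcontra
        exact mixA_ne ha (List.append_eq_nil_iff.1 hcontra).1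
      · cases rest' with
        | nil => simp at hany
        | cons d rest2 =>
          have := ih (by simp) hany
          intro hcontra
          exact this (List.append_eq_nil_iff.1 hcontra).2

lemma passA_getD {cs : List Char} (h : ∀ c ∈ cs, Ryb c) :
    ∀ i, i + 1 < cs.length →
      vz ((passA cs).getD i 'r') = -(vz (cs.getD i 'r') + vz (cs.getD (i + 1) 'r')) := by
  induction cs with
  | nil => intro i hi; simp at hi
  | cons a rest ih =>
    cases rest with
    | nil => intro i hi; simp at hi
    | cons b rest' =>
      have ha : Ryb a := h a (by simp)
      have hb : Ryb b := h b (by simp)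
      intro i hi
      rw [passA_cons_cons ha hb]
      cases i with
      | zero => simp [vz_ichar]
      | succ j =>
        simp only [List.getD_cons_succ]
        exact ih (fun c hc => h c (by simp [hc])) j
          (by simp only [List.length_cons] at hi ⊢; omega)

lemma pascal_sum (n : Nat) (v : Nat → ZMod 3) :
    ∑ i ∈ Finset.range (n+2), (Nat.choose (n+1) i : ZMod 3) * v i
    = ∑ i ∈ Finset.range (n+1), (Nat.choose n i : ZMod 3) * v i
      + ∑ i ∈ Finset.range (n+1), (Nat.choose n i : ZMod 3) * v (i+1) := by
  rw [Finset.sum_range_succ' (f := fun i => (Nat.choose (n+1) i : ZMod 3) * v i)]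
  simp only [Nat.choose_succ_succ]
  push_cast
  simp only [add_mul]
  rw [Finset.sum_add_distrib]
  have h0 : ∑ i ∈ Finset.range (n+1), (Nat.choose n (i+1) : ZMod 3) * v (i+1)
        + (Nat.choose n 0 : ZMod 3) * v 0
      = ∑ i ∈ Finset.range (n+1), (Nat.choose n i : ZMod 3) * v i := by
    rw [← Finset.sum_range_succ' (f := fun i => (Nat.choose n i : ZMod 3) * v i) (n+1)]
    rw [Finset.sum_range_succ]
    simp [Nat.choose_succ_self]
  simp only [Nat.choose_zero_right, Nat.cast_one, one_mul] at h0 ⊢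
  linear_combination h0

lemma pass_sum {cs : List Char} {n : Nat} (h : ∀ c ∈ cs, Ryb c)
    (hl : cs.length = n + 2) : S n (passA cs) = -S (n + 1) cs := by
  unfold S
  rw [passA_len h, hl]
  have hcong : ∑ i ∈ Finset.range (n + 2 - 1), (Nat.choose n i : ZMod 3) * vz ((passA cs).getD i 'r')
      = ∑ i ∈ Finset.range (n+1), (Nat.choose n i : ZMod 3)
          * (-(vz (cs.getD i 'r') + vz (cs.getD (i+1) 'r'))) := by
    refine Finset.sum_congr rfl (fun i hi => ?_)
    rw [passA_getD h i (by simp only [Finset.mem_range] at hi; omega)]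
  rw [hcong, pascal_sum n (fun i => vz (cs.getD i 'r'))]
  simp only [mul_neg, mul_add]
  rw [Finset.sum_neg_distrib, Finset.sum_add_distrib]

lemma goA_spec : ∀ n fuel (cs : List Char), cs.length = n + 1 → n + 1 ≤ fuel →
    (∀ c ∈ cs, Ryb c) → goA fuel cs = [ichar ((-1) ^ n * S n cs)] := by
  intro n
  induction n with
  | zero =>
    intro fuel cs hl hf h
    obtain ⟨f, rfl⟩ : ∃ f, fuel = f + 1 := ⟨fuel - 1, by omega⟩
    obtain ⟨a, rfl⟩ : ∃ a, cs = [a] := List.length_eq_one_iff.1 hl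
    rw [goA, if_pos (show ([a] : List Char).length = 1 from rfl)]
    have : S 0 [a] = vz a := by simp [S]
    rw [this, pow_zero, one_mul, ichar_vz (h a (by simp))]
  | succ n ih =>
    intro fuel cs hl hf h
    obtain ⟨f, rfl⟩ : ∃ f, fuel = f + 1 := ⟨fuel - 1, by omega⟩
    rw [goA, if_neg (by omega)]
    have hlen : (passA cs).length = n + 1 := by rw [passA_len h]; omega
    rw [ih f (passA cs) hlen (by omega) passA_all]
    rw [pass_sum h (by omega : cs.length = n + 2)]
    have hsign : ((-1 : ZMod 3)) ^ n * -(S (n + 1) cs) = (-1) ^ (n + 1) * S (n + 1) cs := by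
      rw [pow_succ]; ring
    rw [hsign]

lemma binom3go_eq : ∀ k m r, r < 3 → binom3go m k r = r * Nat.choose m k % 3 := by
  intro k
  induction k using Nat.strong_induction_on with
  | _ k ih =>
    intro m r hr
    rw [binom3go]
    by_cases hk : k = 0
    · rw [if_pos hk, hk, Nat.choose_zero_right, Nat.mul_one, Nat.mod_eq_of_lt hr]
    · rw [if_neg hk]
      rw [ih (k / 3) (Nat.div_lt_self (by omega) (by omega)) (m / 3)
        (r * binomSmall (m % 3) (k % 3) % 3) (Nat.mod_lt _ (by omega))]
      have hbs : binomSmall (m % 3) (k % 3) = Nat.choose (m % 3) (k % 3) := by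
        have h1 : m % 3 < 3 := Nat.mod_lt _ (by omega)
        have h2 : k % 3 < 3 := Nat.mod_lt _ (by omega)
        generalize m % 3 = a at h1; generalize k % 3 = b at h2
        interval_cases a <;> interval_cases b <;> rfl
      rw [hbs, Nat.mod_mul_mod, mul_assoc]
      haveI : Fact (Nat.Prime 3) := ⟨by norm_num⟩
      exact (Nat.ModEq.mul_left r Choose.choose_modEq_choose_mod_mul_choose_div_nat).symm

lemma binom3_eq (m k : Nat) : binom3 m k = Nat.choose m k % 3 := by
  simpa [binom3] using binom3go_eq k m 1 (by omega)

lemma valC_cast {c : Char} (h : Ryb c) : ((valC c : Int) : ZMod 3) = vz c := by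
  rcases h with h | h | h <;> subst h <;> decide

lemma foldB (mm : Nat) : ∀ (cs : List Char) (s : Nat) (t : Int),
    (PySem.List.enumerate cs (s : Int)).foldl
      (fun t p => t + (binom3 mm p.1.toNat : Int) * valC p.2) t
    = t + ∑ i ∈ Finset.range cs.length, (binom3 mm (s + i) : Int) * valC (cs.getD i 'r') := by
  intro cs
  induction cs with
  | nil => intro s t; simp [PySem.List.enumerate_nil]
  | cons c cs ih =>
    intro s t
    rw [PySem.List.enumerate_cons c cs (s : Int), List.foldl_cons]
    have hcast : ((s : Int) + 1) = ((s + 1 : Nat) : Int) := by push_cast; ring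
    rw [hcast, ih (s + 1) (t + (binom3 mm (s : Int).toNat : Int) * valC c)]
    rw [List.length_cons,
      Finset.sum_range_succ' (f := fun i => (binom3 mm (s + i) : Int) * valC ((c :: cs).getD i 'r'))]
    simp only [List.getD_cons_zero, List.getD_cons_succ, Int.toNat_natCast, Nat.add_zero]
    have hsh : ∑ x ∈ Finset.range cs.length, (binom3 mm (s + (x + 1)) : Int) * valC (cs.getD x 'r')
        = ∑ x ∈ Finset.range cs.length, (binom3 mm (s + 1 + x) : Int) * valC (cs.getD x 'r') :=
      Finset.sum_congr rfl (fun i _ => by rw [show s + (i + 1) = s + 1 + i by omega])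
    rw [hsh]
    ring

-- cast of B's accumulated total into GF(3) is the weighted sum S
lemma totalB_cast (mm : Nat) (cs : List Char) (h : ∀ c ∈ cs, Ryb c) :
    (((PySem.List.enumerate cs 0).foldl
        (fun t p => t + (binom3 mm p.1.toNat : Int) * valC p.2) 0 : Int) : ZMod 3)
    = S mm cs := by
  have hf := foldB mm cs 0 0
  rw [Nat.cast_zero] at hf
  rw [hf]
  unfold S
  push_cast
  rw [zero_add]
  refine Finset.sum_congr rfl (fun i hi => ?_)
  have hi' : i < cs.length := Finset.mem_range.1 hi
  have hm : cs.getD i 'r' ∈ cs := by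
    rw [List.getD_eq_getElem cs 'r' hi']
    exact List.getElem_mem hi'
  rw [Nat.zero_add, binom3_eq, ZMod.natCast_mod, valC_cast (h _ hm)]
-- final characterisation of B's output, given the GF(3) value of its total
lemma outB (v : ZMod 3) (t2 : Int) (h2 : (t2 : ZMod 3) = v) :
    (match PySem.Str.pyGet? "ryb" (PySem.Int.mod t2 3) with
      | some c => String.ofList [c]
      | none => "")
    = String.ofList [ichar v] := by
  have h3 : PySem.Int.mod t2 3 = t2 % 3 := PySem.Int.mod_eq_emod_of_pos (by omega)
  have hge : 0 ≤ t2 % 3 := Int.emod_nonneg t2 (by omega)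
  have hlt : t2 % 3 < 3 := Int.emod_lt_of_pos t2 (by omega)
  have hcast : ((t2 % 3 : Int) : ZMod 3) = v := by
    rw [show ((3:Int)) = ((3:Nat):Int) from rfl, ZMod.intCast_mod t2 3, h2]
  rcases (by omega : t2 % 3 = 0 ∨ t2 % 3 = 1 ∨ t2 % 3 = 2) with hj | hj | hj <;>
      rw [h3, hj] <;> rw [hj] at hcast
  · have hv : v = 0 := by rw [← hcast]; decide
    subst hv; decide
  · have hv : v = 1 := by rw [← hcast]; decide
    subst hv; decide
  · have hv : v = 2 := by rw [← hcast]; decide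
    subst hv; decide

lemma passA_flat : ∀ cs : List Char,
    passA cs = (cs.zip cs.tail).flatMap (fun p => mixA p.1 p.2) := by
  intro cs
  induction cs with
  | nil => rfl
  | cons a rest ih =>
    cases rest with
    | nil => rfl
    | cons b rest' =>
      rw [passA, ih]
      rfl

lemma mixB_eq_mixA : ∀ a b : Char, mixB a b = mixA a b := by
  intro a b
  unfold mixB mixA
  split_ifs <;> rfl

lemma passB_eq_passA (cs : List Char) : passB cs = passA cs := by
  unfold passB
  rw [PySem.List.foldl_append_eq_flatMap, passA_flat, List.nil_append]
  exact congrArg (fun f => List.flatMap f (cs.zip cs.tail))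
    (funext fun (p : Char × Char) => mixB_eq_mixA p.1 p.2)

-- B's closed-form tail evaluated on a list t of colour characters equals A's reduced colour
lemma altCore (t : List Char) (L : Nat) (hL : t.length = L + 1) (hall : ∀ c ∈ t, Ryb c) :
    (match PySem.Str.pyGet? "ryb" (PySem.Int.mod
        (if PySem.Int.mod ((t.length : Int) - 1) 2 = 1
         then -((PySem.List.enumerate t 0).foldl
            (fun a p => a + (binom3 (t.length - 1) p.1.toNat : Int) * valC p.2) 0)
         else (PySem.List.enumerate t 0).foldl
            (fun a p => a + (binom3 (t.length - 1) p.1.toNat : Int) * valC p.2) 0) 3) with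
      | some c => String.ofList [c]
      | none => "")
    = String.ofList [ichar ((-1) ^ L * S L t)] := by
  simp only [hL, Nat.add_sub_cancel]
  have htot := totalB_cast L t hall
  have hpm : PySem.Int.mod (((L + 1 : Nat) : Int) - 1) 2 = ((L % 2 : Nat) : Int) := by
    rw [PySem.Int.mod_eq_emod_of_pos (by omega)]
    push_cast
    omega
  by_cases hpar : L % 2 = 1
  · rw [if_pos (by rw [hpm, hpar]; rfl)]
    refine outB _ _ ?_
    push_cast
    rw [htot, (Nat.odd_iff.2 hpar).neg_one_pow]
    ring
  · rw [if_neg (by rw [hpm]; intro hc; exact hpar (by exact_mod_cast hc))]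
    refine outB _ _ ?_
    rw [htot, (Nat.even_iff.2 (by omega)).neg_one_pow]
    ring

-- ===== VERDICT (by name: the statement is the Claim_ definition above) =====
theorem colour_trio_spec : Claim_equal_colour_trio := by
  intro colours _ hpre
  unfold Spec_colour_trio colour_trio colour_trio_alt
  by_cases h1 : colours.toList.length = 1
  · rw [if_pos h1, goA, if_pos h1, String.ofList_toList]
  · rcases hpre with h1' | ⟨h2, hany⟩
    · exact absurd h1' h1
    rw [if_neg h1, goA, if_neg h1, passB_eq_passA]
    have hne := passA_ne colours.toList h2 hany
    obtain ⟨L, hL⟩ : ∃ L, (passA colours.toList).length = L + 1 :=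
      ⟨(passA colours.toList).length - 1, by
        have : 0 < (passA colours.toList).length := List.length_pos_iff.2 hne
        omega⟩
    have hlen_le := passA_len_le colours.toList
    rw [goA_spec L colours.toList.length (passA colours.toList) hL (by omega) passA_all]
    exact (altCore (passA colours.toList) L hL passA_all).symm
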